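-- pv_equiv track=rewrite | github.com/pimang62/Codingtest | codility/Lesson15/AbsDistinct.py | solution
-- ===== SOURCE A (Python) =====
-- def solution(A):
--     N = len(A)  # [1..100000]
--     d = {}
--     for i in range(N):
--         tmp = abs(A[i])
--         if tmp not in d:
--             d[tmp] = 1  # just 1
--
--     return len(d)
-- ===== SOURCE B (Python) =====
-- def solution(A):
--     s = sorted(abs(x) for x in A)
--     count = 0
--     prev = None
--     for v in s:
--         if prev is None or v != prev:
--             count += 1
--         prev = v
--     return count
-- ===== Notes on version B (the rewrite author's own statement) =====
-- stated objective: alternative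
-- what changed: Replaced A's dict-membership loop (insert each unseen absolute value, return dict size) with a sort of the absolute values followed by one linear pass counting positions that differ from the previous element.
import Mathlib
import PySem

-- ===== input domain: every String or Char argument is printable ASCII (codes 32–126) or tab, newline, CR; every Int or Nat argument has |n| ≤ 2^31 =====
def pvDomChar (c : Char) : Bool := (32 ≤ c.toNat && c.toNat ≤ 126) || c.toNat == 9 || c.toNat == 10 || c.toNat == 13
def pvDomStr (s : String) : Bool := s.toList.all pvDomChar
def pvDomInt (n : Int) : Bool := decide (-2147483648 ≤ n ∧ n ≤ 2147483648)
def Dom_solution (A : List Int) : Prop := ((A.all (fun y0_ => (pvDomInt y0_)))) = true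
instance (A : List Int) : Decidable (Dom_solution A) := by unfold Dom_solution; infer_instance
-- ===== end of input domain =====

-- B replaces A's dict-membership scan with sort-then-adjacent-scan (alternative algorithm, same result).

-- ===== PORT A =====
-- 'for i in range(N): tmp = abs(A[i])' visits exactly the elements of A in order: folded over A.
def solution (A : List Int) : Int :=
  let d := A.foldl (fun d x =>
      if (d.contains |x|) then d else d.insert |x| (1 : Int)) PySem.Dict.empty
  ((PySem.Dict.size d : Nat) : Int)

-- ===== PORT B =====
def solution_alt (A : List Int) : Int :=
  let s := PySem.List.sorted (A.map (fun x => |x|)) (fun x => x) false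
  (s.foldl (fun (st : Option Int × Int) v =>
      if st.1 ≠ some v then (some v, st.2 + 1) else (some v, st.2)) (none, (0 : Int))).2

-- ===== PRECONDITION & SPEC =====
def Spec_solution (A : List Int) (out : Int) : Prop := out = solution_alt A
instance (A : List Int) (out : Int) : Decidable (Spec_solution A out) := by unfold Spec_solution; infer_instance

-- ===== CLAIM (what is proved, stated in full; the proofs are below) =====
def Claim_equal_solution : Prop := ∀ (A : List Int), Dom_solution A → Spec_solution A (solution A)

-- ===== LEMMAS AND PROOFS =====

-- A's loop: the keys of the conditionally-inserting fold are the distinct |x| in first-occurrence order.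
theorem keys_fold_absDict : ∀ (L : List Int) (d : PySem.Dict Int Int),
    (L.foldl (fun d x => if (d.contains |x|) then d else d.insert |x| (1 : Int)) d).keys
      = PySem.Set.update d.keys (L.map (fun x => |x|)) := by
  intro L
  induction L with
  | nil => intro d; simp [PySem.Set.update]
  | cons x xs ih =>
    intro d
    simp only [List.foldl_cons, List.map_cons, PySem.Set.update_cons]
    by_cases h : d.contains |x| = true
    · rw [if_pos h, ih, PySem.Set.add_of_mem]
      exact (PySem.Dict.contains_iff_mem_keys d |x|).mp h
    · rw [if_neg h, ih, PySem.Dict.keys_insert_of_not_contains d (1 : Int) (by simpa using h),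
        PySem.Set.add_of_not_mem]
      intro hm
      exact h ((PySem.Dict.contains_iff_mem_keys d |x|).mpr hm)

-- the adjacent-change count of B's loop, as structural recursion
def scanC : Option Int → List Int → Int
  | _, [] => 0
  | p, x :: xs => (if p ≠ some x then 1 else 0) + scanC (some x) xs

theorem foldl_eq_scanC : ∀ (s : List Int) (p : Option Int) (c : Int),
    (s.foldl (fun (st : Option Int × Int) v =>
      if st.1 ≠ some v then (some v, st.2 + 1) else (some v, st.2)) (p, c)).2
      = c + scanC p s := by
  intro s
  induction s with
  | nil => intro p c; simp [scanC]
  | cons x xs ih =>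
    intro p c
    simp only [List.foldl_cons, scanC]
    by_cases h : p = some x
    · rw [if_neg (by simp [h]), if_neg (by simp [h]), ih]
      ring
    · rw [if_pos h, if_pos h, ih]
      ring

-- on a nondecreasing list with lower bound p, scanC counts the distinct elements other than p's value
theorem scanC_sorted : ∀ (s : List Int), s.Pairwise (· ≤ ·) →
    ∀ (p : Option Int), (∀ y ∈ s, ∀ q, p = some q → q ≤ y) →
    scanC p s = (((PySem.Set.ofList s).filter (fun y => decide (p ≠ some y))).length : Int) := by
  intro s
  induction s with
  | nil => intro _ p _; simp [scanC, PySem.Set.ofList]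
  | cons x xs ih =>
    intro hpw p hlb
    have hx_le : ∀ y ∈ xs, x ≤ y := fun y hy => (List.pairwise_cons.mp hpw).1 y hy
    have hxs_pw : xs.Pairwise (· ≤ ·) := (List.pairwise_cons.mp hpw).2
    have hrec := ih hxs_pw (some x)
      (by intro y hy q hq
          have h1 := hx_le y hy
          have h2 : x = q := Option.some.inj hq
          omega)
    rw [PySem.Set.ofList_cons]
    by_cases h : p = some x
    · subst h
      have h0 : scanC (some x) (x :: xs) = scanC (some x) xs := by simp [scanC]
      rw [h0, hrec]
      congr 2
      rw [List.filter_cons_of_neg (by simp)]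
      simp only [PySem.Set.discard, List.filter_filter]
      apply List.filter_congr
      intro y _
      by_cases hxy : x = y
      · simp [hxy]
      · have hyx : y ≠ x := fun he => hxy he.symm
        simp [hxy, hyx]
    · have hstep : scanC p (x :: xs) = 1 + scanC (some x) xs := by
        simp [scanC, h]
      rw [hstep, hrec]
      have hPx : decide (p ≠ some x) = true := by simpa using h
      rw [List.filter_cons, if_pos hPx, List.length_cons]
      have hfilters :
          ((PySem.Set.discard (PySem.Set.ofList xs) x).filter (fun y => decide (p ≠ some y)))
            = (PySem.Set.ofList xs).filter (fun y => decide (some x ≠ some y)) := by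
        simp only [PySem.Set.discard, List.filter_filter]
        apply List.filter_congr
        intro y hy
        have hy' : y ∈ xs := (PySem.Set.mem_ofList xs y).mp hy
        have hxy : x ≤ y := hx_le y hy'
        by_cases hex : x = y
        · simp [hex]
        · cases p with
          | none => simp [hex, Ne.symm hex]
          | some q =>
            have hq : q ≤ x := hlb x (by simp) q rfl
            have hqx : q ≠ x := fun he => h (by rw [he])
            have hqy : q ≠ y := by omega
            simp [hex, Ne.symm hex, hqy]
      rw [hfilters]
      push_cast
      ring

-- A's count and B's count both equal the number of distinct absolute values.
theorem solution_eq_card (A : List Int) :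
    solution A = ((PySem.Set.ofList (A.map (fun x => |x|))).length : Int) := by
  unfold solution
  have h := keys_fold_absDict A PySem.Dict.empty
  have hsize : ∀ (d : PySem.Dict Int Int), PySem.Dict.size d = d.keys.length := by
    intro d; simp [PySem.Dict.size, PySem.Dict.keys]
  simp only [hsize, h, PySem.Dict.keys_empty, PySem.Set.update_nil_left]

theorem solution_alt_eq_card (A : List Int) :
    solution_alt A = ((PySem.Set.ofList (A.map (fun x => |x|))).length : Int) := by
  unfold solution_alt
  set L := A.map (fun x => |x|) with hL
  set s := PySem.List.sorted L (fun x => x) false with hs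
  have hpw : s.Pairwise (· ≤ ·) := by
    simpa using PySem.List.sorted_pairwise L (fun x => x)
  have hperm : s.Perm L := PySem.List.sorted_perm L (fun x => x) false
  rw [foldl_eq_scanC, scanC_sorted s hpw none (by simp), zero_add]
  have hfit : (PySem.Set.ofList s).filter (fun y => decide ((none : Option Int) ≠ some y))
      = PySem.Set.ofList s := by
    apply List.filter_eq_self.mpr; intro y _; simp
  rw [hfit]
  congr 1
  have hnd1 : (PySem.Set.ofList s).Nodup := PySem.Set.nodup_ofList s
  have hnd2 : (PySem.Set.ofList L).Nodup := PySem.Set.nodup_ofList L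
  have hp : (PySem.Set.ofList s).Perm (PySem.Set.ofList L) := by
    rw [List.perm_ext_iff_of_nodup hnd1 hnd2]
    intro y
    simp only [PySem.Set.mem_ofList]
    exact ⟨fun hy => hperm.mem_iff.mp hy, fun hy => hperm.mem_iff.mpr hy⟩
  exact hp.length_eq

-- ===== VERDICT (by name: the statement is the Claim_ definition above) =====
theorem solution_spec : Claim_equal_solution := by
  intro A _
  unfold Spec_solution
  rw [solution_eq_card, solution_alt_eq_card]
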